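-- pv_equiv track=rewrite | github.com/AshOlogn/markov-famouswords-bot | markov_speech.py | get_history_string
-- ===== SOURCE A (Python) =====
-- def get_history_string(sliding_window, input_index=0):
--   length = len(sliding_window)
--   index = input_index
--   final_string = ["a"]*length
--   for i in range(length):
--     final_string[i] = sliding_window[index % length]
--     index += 1
--   return ' '.join(final_string)
-- ===== SOURCE B (Python) =====
-- def get_history_string(sliding_window, input_index=0):
--     if not sliding_window:
--         return ''
--     start = input_index % len(sliding_window)
--     return ' '.join(sliding_window[start:] + sliding_window[:start])
-- ===== Notes on version B (the rewrite author's own statement) =====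
-- stated objective: simpler
-- what changed: Replaced the per-element modular-index loop that fills a preallocated list with a single closed-form rotation: start = input_index % len, then join of sliding_window[start:] + sliding_window[:start] (empty list guarded to '').
import Mathlib
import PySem

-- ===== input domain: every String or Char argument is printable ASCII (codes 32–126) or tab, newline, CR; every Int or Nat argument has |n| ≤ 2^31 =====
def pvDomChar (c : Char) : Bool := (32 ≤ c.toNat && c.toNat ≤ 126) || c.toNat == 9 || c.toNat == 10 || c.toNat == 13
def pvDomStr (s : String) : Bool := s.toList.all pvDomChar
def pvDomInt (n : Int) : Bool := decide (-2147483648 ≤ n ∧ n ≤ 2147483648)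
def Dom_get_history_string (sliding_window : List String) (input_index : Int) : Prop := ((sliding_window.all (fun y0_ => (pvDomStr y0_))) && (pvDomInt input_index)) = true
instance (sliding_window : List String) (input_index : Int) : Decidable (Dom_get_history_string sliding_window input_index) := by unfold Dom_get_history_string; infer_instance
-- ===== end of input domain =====

-- B replaces A's per-element modular-index loop by a single slice-and-concatenate rotation (simpler, same cost).

-- ===== PORT A =====
def get_history_string (sliding_window : List String) (input_index : Int) : String :=
  let length : Int := (sliding_window.length : Int)
  let final_string : List String := List.replicate sliding_window.length "a"
  let res := (PySem.List.pyRange 0 length 1).foldl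
    (fun (st : List String × Int) i =>
      (PySem.List.pySetD st.1 i
        (PySem.List.pyGetD sliding_window (PySem.Int.mod st.2 length) ""), st.2 + 1))
    (final_string, input_index)
  PySem.Str.join " " res.1

-- ===== PORT B =====
def get_history_string_alt (sliding_window : List String) (input_index : Int) : String :=
  if sliding_window.isEmpty then "" else
    let start : Int := PySem.Int.mod input_index (sliding_window.length : Int)
    PySem.Str.join " "
      (PySem.List.slice sliding_window (some start) none ++
       PySem.List.slice sliding_window none (some start))

-- ===== PRECONDITION & SPEC =====
def Spec_get_history_string (sliding_window : List String) (input_index : Int) (out : String) : Prop := out = get_history_string_alt sliding_window input_index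
instance (sliding_window : List String) (input_index : Int) (out : String) : Decidable (Spec_get_history_string sliding_window input_index out) := by unfold Spec_get_history_string; infer_instance

-- ===== CLAIM (what is proved, stated in full; the proofs are below) =====
def Claim_equal_get_history_string : Prop := ∀ (sliding_window : List String) (input_index : Int), Dom_get_history_string sliding_window input_index → Spec_get_history_string sliding_window input_index (get_history_string sliding_window input_index)

-- ===== LEMMAS AND PROOFS =====

-- the value A writes at position j
def pvF (sw : List String) (ii : Int) (j : Nat) : String :=
  sw.getD ((PySem.Int.mod (ii + j) (sw.length : Int)).toNat) ""

lemma pvF_eq (sw : List String) (ii : Int) (hn : 0 < sw.length) (k : Nat) :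
    PySem.List.pyGetD sw (PySem.Int.mod (ii + k) (sw.length : Int)) "" = pvF sw ii k := by
  have h0 : (0 : Int) < (sw.length : Int) := by exact_mod_cast hn
  have hge := PySem.Int.mod_nonneg (ii + k) h0
  have hlt := PySem.Int.mod_lt (ii + k) h0
  rw [PySem.List.pyGetD_eq_getElem sw "" hge hlt, pvF,
    List.getD_eq_getElem sw "" (by omega)]

-- loop invariant for A's fold
lemma loopA (sw : List String) (ii : Int) :
    ∀ (m k : Nat) (fs : List String), m = sw.length - k → k ≤ sw.length →
      fs.length = sw.length →
      ((PySem.List.pyRange (k : Int) (sw.length : Int) 1).foldl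
        (fun (st : List String × Int) i =>
          (PySem.List.pySetD st.1 i
            (PySem.List.pyGetD sw (PySem.Int.mod st.2 (sw.length : Int)) ""), st.2 + 1))
        (fs, ii + k)).1
      = fs.take k ++ (List.range (sw.length - k)).map (fun t => pvF sw ii (k + t)) := by
  intro m
  induction m with
  | zero =>
    intro k fs hm hk hlen
    have hkn : k = sw.length := by omega
    subst hkn
    rw [PySem.List.pyRange_one_eq_nil (by omega)]
    simp only [List.foldl_nil, Nat.sub_self, List.range_zero, List.map_nil, List.append_nil]
    rw [List.take_of_length_le (le_of_eq hlen)]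
  | succ m ih =>
    intro k fs hm hk hlen
    have hklt : k < sw.length := by omega
    rw [PySem.List.pyRange_one_cons (by exact_mod_cast hklt)]
    simp only [List.foldl_cons]
    have hset : PySem.List.pySetD fs (k : Int)
        (PySem.List.pyGetD sw (PySem.Int.mod (ii + k) (sw.length : Int)) "")
        = fs.set k (pvF sw ii k) := by
      rw [pvF_eq sw ii (by omega) k, PySem.List.pySetD_natCast]
    have hstep : ((k : Int) + 1) = ((k + 1 : Nat) : Int) := by push_cast; ring
    have hidx : ii + (k : Int) + 1 = ii + ((k + 1 : Nat) : Int) := by push_cast; ring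
    rw [hset, hstep, hidx,
      ih (k + 1) (fs.set k (pvF sw ii k)) (by omega) (by omega) (by simp [hlen])]
    have htake : (fs.set k (pvF sw ii k)).take (k + 1)
        = fs.take k ++ [pvF sw ii k] := by
      rw [List.take_add_one, List.take_set_of_le (le_refl k)]
      simp [hlen, hklt]
    have hmap : (List.range (sw.length - k)).map (fun t => pvF sw ii (k + t))
        = pvF sw ii k :: (List.range (sw.length - (k + 1))).map (fun t => pvF sw ii (k + 1 + t)) := by
      have hr : sw.length - k = (sw.length - (k + 1)) + 1 := by omega
      rw [hr, List.range_succ_eq_map, List.map_cons, List.map_map]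
      refine congrArg₂ _ (by simp) ?_
      symm
      apply List.map_congr_left
      intro t _
      simp only [Function.comp_apply]
      congr 1
      omega
    rw [htake, hmap]
    simp

-- B's rotated list has the same entries
lemma rot_eq (sw : List String) (ii : Int) (hn : 0 < sw.length) :
    PySem.List.slice sw (some (PySem.Int.mod ii (sw.length : Int))) none ++
      PySem.List.slice sw none (some (PySem.Int.mod ii (sw.length : Int)))
    = (List.range sw.length).map (fun t => pvF sw ii t) := by
  have h0 : (0 : Int) < (sw.length : Int) := by exact_mod_cast hn
  have hge := PySem.Int.mod_nonneg ii h0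
  have hlt := PySem.Int.mod_lt ii h0
  set s : Nat := (PySem.Int.mod ii (sw.length : Int)).toNat with hs
  have hsn : s < sw.length := by omega
  have hmod : PySem.Int.mod ii (sw.length : Int) = ((s : Nat) : Int) := by omega
  have hfj : ∀ j : Nat, pvF sw ii j = sw.getD ((s + j) % sw.length) "" := by
    intro j
    rw [pvF]
    congr 1
    have he := PySem.Int.mod_eq_emod_of_pos (a := ii + j) h0
    have he2 := PySem.Int.mod_eq_emod_of_pos (a := ii) h0
    have hmods : ii % (sw.length : Int) = ((s : Nat) : Int) % (sw.length : Int) := by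
      rw [← he2, hmod, Int.emod_eq_of_lt (by omega) (by omega)]
    have key : (ii + (j : Int)) % (sw.length : Int)
        = (((s + j) % sw.length : Nat) : Int) := by
      push_cast
      conv_lhs => rw [Int.add_emod]
      conv_rhs => rw [Int.add_emod]
      rw [hmods]
    rw [he, key]
    exact Int.toNat_natCast _
  rw [PySem.List.slice_from _ hge, PySem.List.slice_to _ hge, ← hs]
  apply List.ext_getElem
  · simp; omega
  · intro j h1 h2
    have hjn : j < sw.length := by simpa using h2
    simp only [List.getElem_map, List.getElem_range]
    rw [hfj j]
    by_cases hcase : j < sw.length - s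
    · rw [List.getElem_append_left (by simp [List.length_drop]; omega)]
      rw [List.getElem_drop]
      rw [Nat.mod_eq_of_lt (by omega), List.getD_eq_getElem sw "" (by omega)]
    · rw [List.getElem_append_right (by simp [List.length_drop]; omega)]
      have hmn : (s + j) % sw.length = s + j - sw.length := by
        rw [Nat.mod_eq_sub_mod (by omega), Nat.mod_eq_of_lt (by omega)]
      rw [hmn, List.getD_eq_getElem sw "" (by omega), List.getElem_take]
      congr 1
      simp [List.length_drop]
      omega

-- ===== VERDICT (by name: the statement is the Claim_ definition above) =====
theorem get_history_string_spec : Claim_equal_get_history_string := by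
  intro sw ii _
  unfold Spec_get_history_string get_history_string get_history_string_alt
  by_cases hemp : sw = []
  · subst hemp
    simp [PySem.List.pyRange_one_eq_nil]
    rfl
  · have hn : 0 < sw.length := List.length_pos_of_ne_nil hemp
    have hisempty : sw.isEmpty = false := by simpa [List.isEmpty_iff] using hemp
    simp only [hisempty, Bool.false_eq_true, if_false]
    have h := loopA sw ii sw.length 0 (List.replicate sw.length "a") (by omega) (by omega) (by simp)
    simp only [Nat.cast_zero, add_zero, List.take_zero, Nat.sub_zero, zero_add,
      List.nil_append] at h
    rw [h, ← rot_eq sw ii hn]
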